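-- pv_equiv track=rewrite | github.com/alex20000910/main | src/tool/loader.py | check_repeat
-- ===== SOURCE A (Python) =====
-- def check_repeat(name):
--     fl = False
--     tname = [f for f in name]
--     if len(name) != len(set(name)):
--         fl = True
--     if fl:
--         t = 0
--         while t < len(tname):
--             fj = False
--             tt = False
--             tj = t
--             for j in range(t+1, len(name)):
--                 if name[t] == name[j]:
--                     if not tt:
--                         tname[t] = tname[t]+'#id#'+str(t)
--                         tt = True
--                     tname[j] = tname[j]+'#id#'+str(j)
--                     fj = True
--                     tj = j
--             if fj:
--                 t = tj
--             t+=1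
--     return tname
-- ===== SOURCE B (Python) =====
-- # B: one pass builds value -> sorted occurrence-index lists, then a forward-pointer
-- # simulation of the scan replaces A's quadratic inner rescans (amortised linear).
-- def check_repeat(name):
--     occ = {}
--     for i, v in enumerate(name):
--         occ.setdefault(v, []).append(i)
--     out = list(name)
--     t = 0
--     n = len(name)
--     while t < n:
--         lst = occ[name[t]]
--         if lst[-1] > t:
--             rest = [j for j in lst if j > t]
--             out[t] = out[t] + '#id#' + str(t)
--             for j in rest:
--                 out[j] = out[j] + '#id#' + str(j)
--             t = lst[-1] + 1
--         else:
--             t += 1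
--     return out
-- ===== Notes on version B (the rewrite author's own statement) =====
-- stated objective: faster
-- what changed: B precomputes a value-to-occurrence-index dict in one pass and then simulates the scan with forward jumps over each precomputed group, instead of A's rescan of the whole remaining list at every position.
import Mathlib
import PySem

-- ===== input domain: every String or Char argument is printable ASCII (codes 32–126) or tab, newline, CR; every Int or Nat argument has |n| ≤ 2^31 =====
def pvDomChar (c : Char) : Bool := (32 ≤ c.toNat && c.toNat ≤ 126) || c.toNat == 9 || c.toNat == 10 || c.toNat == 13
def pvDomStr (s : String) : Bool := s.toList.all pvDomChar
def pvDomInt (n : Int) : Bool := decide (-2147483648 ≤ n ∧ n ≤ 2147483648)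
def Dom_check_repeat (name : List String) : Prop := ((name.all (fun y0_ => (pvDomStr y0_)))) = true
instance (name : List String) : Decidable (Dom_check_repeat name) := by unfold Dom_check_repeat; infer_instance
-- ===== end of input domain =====

-- B replaces A's quadratic rescans by a precomputed value→occurrence-index dict and a
-- forward-pointer simulation; same return value, return-value equivalence proved below.

-- shared one-liner: x = x + '#id#' + str(j) at position j (identical text in both Pythons)
def pvTagAt (o : List String) (j : Nat) : List String :=
  o.set j (o.getD j "" ++ "#id#" ++ PySem.Int.toStr (j : Int))

-- ===== PORT A =====
-- the inner 'for j in range(t+1, len(name))' loop, state (tname, fj, tt, tj)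
def pvAStep (name : List String) (tname : List String) (t : Nat) :
    List String × Bool × Bool × Nat :=
  (List.range' (t+1) (name.length - (t+1))).foldl
    (fun st j =>
      match st with
      | (tn, fj, tt, tj) =>
        if name.getD t "" = name.getD j "" then
          let tn1 := if tt then tn else pvTagAt tn t
          (pvTagAt tn1 j, true, true, j)
        else (tn, fj, tt, tj))
    (tname, false, false, t)

-- the outer 'while t < len(tname)' loop; fuel only makes the recursion structural
-- (t strictly increases each iteration, so fuel = len(name)+1 never runs out)
def pvALoop (name : List String) : Nat → List String → Nat → List String
  | 0, tname, _ => tname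
  | fuel+1, tname, t =>
    if t < name.length then
      match pvAStep name tname t with
      | (tname', fj, _, tj) => pvALoop name fuel tname' ((if fj then tj else t) + 1)
    else tname

def check_repeat (name : List String) : List String :=
  let tname := name.map (fun f => f)
  let fl := name.length ≠ (PySem.Set.ofList name).length
  if fl then pvALoop name (name.length + 1) tname 0 else tname

-- ===== PORT B =====
-- occ: value -> list of its occurrence indices, built in one pass (setdefault/append)
def pvBOcc (name : List String) : PySem.Dict String (List Nat) :=
  name.zipIdx.foldl (fun d p => d.insert p.1 (d.getD p.1 [] ++ [p.2])) PySem.Dict.empty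

-- 'for j in rest: out[j] = out[j] + "#id#" + str(j)'
def pvBTagAll (out : List String) (rest : List Nat) : List String :=
  rest.foldl (fun o j => pvTagAt o j) out

-- the 'while t < n' forward-pointer loop; lst[-1] ported as getLastD 0 (lst is
-- nonempty whenever the branch is reached, the default only totalises)
def pvBLoop (occ : PySem.Dict String (List Nat)) (name : List String) :
    Nat → List String → Nat → List String
  | 0, out, _ => out
  | fuel+1, out, t =>
    if t < name.length then
      let lst := occ.getD (name.getD t "") []
      if t < lst.getLastD 0 then
        let rest := lst.filter (fun j => t < j)
        pvBLoop occ name fuel (pvBTagAll (pvTagAt out t) rest) (lst.getLastD 0 + 1)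
      else pvBLoop occ name fuel out (t + 1)
    else out

def check_repeat_alt (name : List String) : List String :=
  pvBLoop (pvBOcc name) name (name.length + 1) name 0

-- ===== PRECONDITION & SPEC =====
def Spec_check_repeat (name : List String) (out : List String) : Prop := out = check_repeat_alt name
instance (name : List String) (out : List String) : Decidable (Spec_check_repeat name out) := by unfold Spec_check_repeat; infer_instance

-- ===== CLAIM (what is proved, stated in full; the proofs are below) =====
def Claim_equal_check_repeat : Prop := ∀ (name : List String), Dom_check_repeat name → Spec_check_repeat name (check_repeat name)

-- ===== LEMMAS AND PROOFS =====

-- indices of name holding value v, in increasing order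
def pvIdxOf (name : List String) (v : String) : List Nat :=
  (List.range name.length).filter (fun i => name.getD i "" = v)

theorem pvBOcc_getD_aux (l : List (String × Nat)) (d : PySem.Dict String (List Nat)) (v : String) :
    (l.foldl (fun d p => d.insert p.1 (d.getD p.1 [] ++ [p.2])) d).getD v []
      = d.getD v [] ++ (l.filter (fun p => p.1 = v)).map (·.2) := by
  induction l generalizing d with
  | nil => simp
  | cons p l ih =>
    simp only [List.foldl_cons, List.filter_cons, ih]
    by_cases h : p.1 = v
    · subst h
      simp
    · simp [PySem.Dict.getD_insert, h, Ne.symm h]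

theorem pvZipIdx_filter (xs : List String) (v : String) (k : Nat) :
    ((xs.zipIdx k).filter (fun p => p.1 = v)).map (·.2)
      = (List.range' k xs.length).filter (fun i => xs.getD (i - k) "" = v) := by
  induction xs generalizing k with
  | nil => simp
  | cons x xs ih =>
    simp only [List.zipIdx_cons, List.length_cons, List.range'_succ, List.filter_cons,
      Nat.sub_self, List.getD_cons_zero]
    have htail : (List.range' (k+1) xs.length).filter (fun i => (x :: xs).getD (i - k) "" = v)
        = (List.range' (k+1) xs.length).filter (fun i => xs.getD (i - (k+1)) "" = v) := by
      apply List.filter_congr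
      intro i hi
      rcases List.mem_range'_1.mp hi with ⟨h1, _⟩
      have : i - k = (i - (k+1)) + 1 := by omega
      rw [this, List.getD_cons_succ]
    rw [htail]
    split_ifs <;> simp [ih (k+1)]

theorem pvBOcc_getD (name : List String) (v : String) :
    (pvBOcc name).getD v [] = pvIdxOf name v := by
  unfold pvBOcc pvIdxOf
  rw [pvBOcc_getD_aux, pvZipIdx_filter]
  simp [List.range_eq_range']

-- characterization of A's inner for-loop (tt already true)
theorem pvAFold_true (name : List String) (t : Nat) (L : List Nat) (o : List String)
    (fj : Bool) (tj : Nat) :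
    (L.foldl
      (fun st j =>
        match st with
        | (tn, fj, tt, tj) =>
          if name.getD t "" = name.getD j "" then
            let tn1 := if tt then tn else pvTagAt tn t
            (pvTagAt tn1 j, true, true, j)
          else (tn, fj, tt, tj))
      (o, fj, true, tj))
    = ((L.filter (fun j => name.getD t "" = name.getD j "")).foldl (fun o j => pvTagAt o j) o,
        fj || !(L.filter (fun j => name.getD t "" = name.getD j "")).isEmpty, true,
        (L.filter (fun j => name.getD t "" = name.getD j "")).getLastD tj) := by
  induction L generalizing o fj tj with
  | nil => simp
  | cons j L ih =>
    simp only [List.foldl_cons, List.filter_cons]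
    by_cases h : name.getD t "" = name.getD j ""
    · simp only [if_pos h, decide_eq_true h, if_true, ih, List.foldl_cons,
        List.getLastD_cons]
      simp
    · simp only [if_neg h, decide_eq_false h, Bool.false_eq_true, if_false, ih]

-- characterization of A's inner for-loop from the initial state
theorem pvAFold_false (name : List String) (t : Nat) (L : List Nat) (o : List String) :
    (L.foldl
      (fun st j =>
        match st with
        | (tn, fj, tt, tj) =>
          if name.getD t "" = name.getD j "" then
            let tn1 := if tt then tn else pvTagAt tn t
            (pvTagAt tn1 j, true, true, j)
          else (tn, fj, tt, tj))
      (o, false, false, t))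
    = (if (L.filter (fun j => name.getD t "" = name.getD j "")).isEmpty then (o, false, false, t)
       else ((L.filter (fun j => name.getD t "" = name.getD j "")).foldl (fun o j => pvTagAt o j)
               (pvTagAt o t), true, true,
             (L.filter (fun j => name.getD t "" = name.getD j "")).getLastD t)) := by
  induction L with
  | nil => simp
  | cons j L ih =>
    simp only [List.foldl_cons, List.filter_cons]
    by_cases h : name.getD t "" = name.getD j ""
    · simp only [if_pos h, decide_eq_true h, if_true, pvAFold_true,
        List.foldl_cons, List.getLastD_cons]
      simp
    · simp only [if_neg h, decide_eq_false h, Bool.false_eq_true, if_false, ih]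

-- the two loops agree step for step
theorem pvLoop_eq (name : List String) (fuel : Nat) :
    ∀ (out : List String) (t : Nat),
      pvALoop name fuel out t = pvBLoop (pvBOcc name) name fuel out t := by
  induction fuel with
  | zero => intro out t; rfl
  | succ fuel ih =>
    intro out t
    rw [pvALoop, pvBLoop]
    by_cases htn : t < name.length
    · simp only [if_pos htn]
      have hocc : (pvBOcc name).getD (name.getD t "") [] = pvIdxOf name (name.getD t "") :=
        pvBOcc_getD name (name.getD t "")
      have hr : List.range' 0 (t+1) ++ List.range' (t+1) (name.length - (t+1))
          = List.range' 0 name.length := by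
        have h3 : (t+1) + (name.length - (t+1)) = name.length := by omega
        have h2 : List.range' 0 (t+1) 1 ++ List.range' (0+1*(t+1)) (name.length - (t+1)) 1
            = List.range' 0 ((t+1) + (name.length - (t+1))) 1 := List.range'_append
        simpa [h3] using h2
      have hsplit : pvIdxOf name (name.getD t "")
          = (List.range' 0 (t+1)).filter (fun i => name.getD i "" = name.getD t "")
            ++ (List.range' (t+1) (name.length - (t+1))).filter
                 (fun i => name.getD i "" = name.getD t "") := by
        rw [pvIdxOf, List.range_eq_range', ← List.filter_append, hr]
      set pre := (List.range' 0 (t+1)).filter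
          (fun i => decide (name.getD i "" = name.getD t "")) with hpre
      set F := (List.range' (t+1) (name.length - (t+1))).filter
          (fun i => decide (name.getD i "" = name.getD t "")) with hFdef
      have htpre : t ∈ pre := by
        rw [hpre]
        refine List.mem_filter.mpr ⟨List.mem_range'_1.mpr ⟨by omega, by omega⟩, by simp⟩
      have hprele : ∀ i ∈ pre, i ≤ t := by
        intro i hi
        have := (List.mem_filter.mp hi).1
        have := List.mem_range'_1.mp this
        omega
      have hFgt : ∀ j ∈ F, t < j := by
        intro j hj
        have := (List.mem_filter.mp hj).1
        have := List.mem_range'_1.mp this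
        omega
      have hFA : (List.range' (t+1) (name.length - (t+1))).filter
            (fun j => decide (name.getD t "" = name.getD j "")) = F := by
        rw [hFdef]
        exact List.filter_congr (fun j _ => by simp [eq_comm])
      have hstep := pvAFold_false name t (List.range' (t+1) (name.length - (t+1))) out
      rw [hFA] at hstep
      simp only [pvAStep, hstep]
      by_cases hF : F = []
      · -- no later duplicate of name[t]: both loops just advance t
        have hlst : (pvBOcc name).getD (name.getD t "") [] = pre := by
          rw [hocc, hsplit, hF, List.append_nil]
        have hlastle : pre.getLastD 0 ≤ t := by
          have hmem : pre.getLastD 0 ∈ pre := by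
            cases hp : pre with
            | nil => rw [hp] at htpre; cases htpre
            | cons a l =>
              rw [List.getLastD_cons]
              exact @List.getLastD_mem_cons _ l a
          exact hprele _ hmem
        simp only [hF, List.isEmpty_nil, if_true, hlst, if_neg (not_lt.mpr hlastle)]
        exact ih out (t+1)
      · -- name[t] has later duplicates: both tag the whole occurrence group and jump
        set g := F.getLast hF with hg
        have hgmem : g ∈ F := List.getLast_mem hF
        have hgt : t < g := hFgt _ hgmem
        have hlst : (pvBOcc name).getD (name.getD t "") [] = pre ++ F := by
          rw [hocc, hsplit]
        have hlast0 : (pre ++ F).getLastD 0 = g := by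
          rw [List.getLastD_eq_getLast?, List.getLast?_append_of_ne_nil _ hF,
            List.getLast?_eq_some_getLast hF]
          rfl
        have hlastt : F.getLastD t = g := by
          rw [List.getLastD_eq_getLast?, List.getLast?_eq_some_getLast hF]
          rfl
        have hrest : (pre ++ F).filter (fun j => decide (t < j)) = F := by
          rw [List.filter_append, List.filter_eq_nil_iff.mpr
            (fun i hi => by simp [Nat.not_lt.mpr (hprele i hi)]),
            List.filter_eq_self.mpr (fun j hj => by simp [hFgt j hj]), List.nil_append]
        have hFne : F.isEmpty = false := by simp [hF]
        simp only [hFne, Bool.false_eq_true, if_false, hlst, hlast0, if_pos hgt, hrest,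
          hlastt, pvBTagAll]
        exact ih _ (g+1)
    · simp only [if_neg htn]

theorem pvNodup_of_len (name : List String)
    (h : name.length = (PySem.Set.ofList name).length) : name.Nodup := by
  induction name using List.reverseRecOn with
  | nil => simp
  | append_singleton xs x ih =>
    have hofl : PySem.Set.ofList (xs ++ [x]) = PySem.Set.add (PySem.Set.ofList xs) x := by
      rw [PySem.Set.ofList_eq_foldl, List.foldl_append, ← PySem.Set.ofList_eq_foldl]
      rfl
    have hle : ∀ ys : List String, (PySem.Set.ofList ys).length ≤ ys.length := by
      intro ys
      induction ys using List.reverseRecOn with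
      | nil => simp [PySem.Set.ofList_eq_foldl]
      | append_singleton zs z ihz =>
        rw [PySem.Set.ofList_eq_foldl, List.foldl_append, ← PySem.Set.ofList_eq_foldl,
          List.foldl_cons, List.foldl_nil, List.length_append, List.length_singleton]
        by_cases hc : (PySem.Set.ofList zs).contains z = true
        · simp only [PySem.Set.add, hc, if_true]
          omega
        · simp only [PySem.Set.add, hc, Bool.false_eq_true, if_false, List.length_append,
            List.length_singleton]
          omega
    rw [hofl] at h
    by_cases hc : (PySem.Set.ofList xs).contains x = true
    · exfalso
      simp only [PySem.Set.add, hc, if_true, List.length_append, List.length_singleton] at h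
      have := hle xs
      omega
    · simp only [PySem.Set.add, hc, Bool.false_eq_true, if_false, List.length_append,
        List.length_singleton] at h
      have hxs : xs.Nodup := ih (by omega)
      have hx : x ∉ xs := by
        intro hmem
        apply hc
        have : x ∈ PySem.Set.ofList xs := (PySem.Set.mem_ofList xs x).mpr hmem
        simpa [PySem.Set.contains] using this
      simp only [List.nodup_append, List.nodup_cons, List.not_mem_nil, not_false_eq_true,
        List.nodup_nil, and_true, true_and, hxs]
      intro a ha b hb
      rcases List.mem_singleton.mp hb with rfl
      exact fun hax => hx (hax ▸ ha)

-- on a duplicate-free list B's loop never tags anything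
theorem pvBLoop_id (name : List String) (hnd : name.Nodup) (fuel : Nat) :
    ∀ (out : List String) (t : Nat), pvBLoop (pvBOcc name) name fuel out t = out := by
  induction fuel with
  | zero => intro out t; rfl
  | succ fuel ih =>
    intro out t
    rw [pvBLoop]
    by_cases htn : t < name.length
    · have hall : ∀ i ∈ pvIdxOf name (name.getD t ""), i = t := by
        intro i hi
        rcases List.mem_filter.mp hi with ⟨hir, hiv⟩
        have hilt : i < name.length := List.mem_range.mp hir
        have h1 : name.getD i "" = name.getD t "" := by simpa using hiv
        rw [List.getD_eq_getElem?_getD, List.getD_eq_getElem?_getD,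
          List.getElem?_eq_getElem hilt, List.getElem?_eq_getElem htn] at h1
        exact (hnd.getElem_inj_iff).mp (by simpa using h1)
      have hle : ¬ t < ((pvBOcc name).getD (name.getD t "") []).getLastD 0 := by
        rw [pvBOcc_getD]
        cases hp : pvIdxOf name (name.getD t "") with
        | nil => simp
        | cons a l =>
          have hmem : (a :: l).getLastD 0 ∈ a :: l := by
            rw [List.getLastD_cons]
            exact @List.getLastD_mem_cons _ l a
          have := hall ((a :: l).getLastD 0) (by rw [hp]; exact hmem)
          omega
      simp only [if_pos htn, if_neg hle]
      exact ih out (t+1)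
    · simp only [if_neg htn]

-- ===== VERDICT (by name: the statement is the Claim_ definition above) =====
theorem check_repeat_spec : Claim_equal_check_repeat := by
  intro name _
  unfold Spec_check_repeat check_repeat check_repeat_alt
  simp only [List.map_id_fun', id]
  by_cases h : name.length = (PySem.Set.ofList name).length
  · simp only [h, ne_eq, not_true_eq_false, if_false]
    exact (pvBLoop_id name (pvNodup_of_len name h) _ name 0).symm
  · simp only [ne_eq, h, not_false_eq_true, if_true]
    exact pvLoop_eq name _ name 0
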